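-- pv_equiv track=rewrite | github.com/bssrdf/pyleet | D/DivideNodesIntotheMaximumNumberofGroups.py | magnificentSets2
-- ===== SOURCE A (Python) =====
-- from typing import List
-- from collections import defaultdict, deque
--
-- def magnificentSets2(n: int, edges: List[List[int]]) -> int:
--     '''
--     The number of group we can create for a connected graph is the maximum
--     of minimum distances between all nodes in that graph. Here distance
--     equals to number of nodes in the path.
--     '''
--     G = defaultdict(set)
--     dist = [[10**4+1]*(n+1) for _ in range(n+1)]
--     for u,v in edges:
--         G[u].add(v)
--         G[v].add(u)
--     color = [0]*(n+1)
--     def dfs(cur, col, nodes):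
--         if color[cur] != 0:
--             return color[cur] == col
--         color[cur] = col
--         nodes.append(cur) # save nodes in connected components
--         for i in G[cur]:
--             if not dfs(i, -1*col, nodes):
--                 return False
--         return True
--     def bfs(src):
--         # compute minimum distance of src to all other nodes
--         # in the connected components
--         dist[src][src] = 1
--         que = deque([src])
--         while que:
--             u = que.popleft()
--             for v in G[u]:
--                 if dist[src][v] > dist[src][u]+1:
--                     dist[src][v] = dist[src][u]+1
--                     que.append(v)
--     for i in range(1, n+1):
--         bfs(i)
--     ans = 0
--     for i in range(1, n+1):
--         if color[i] == 0:
--             kara = []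
--             mxdist = 0
--             if not dfs(i, 1, kara):
--                 return -1
--             #kara has nodes of one connected components which is
--             # also bipartite
--             for u in kara:
--                 for v in kara:
--                     mxdist = max(mxdist, dist[u][v])
--             ans += mxdist
--
--     return ans
-- ===== SOURCE B (Python) =====
-- from typing import List
-- from collections import defaultdict
--
-- def magnificentSets2(n: int, edges: List[List[int]]) -> int:
--     # Different algorithm for the distances: no all-pairs matrix and no
--     # queue-based BFS.  Components come from the recursive bipartite DFS
--     # coloring; each member's layer depths are computed by Bellman-Ford-style
--     # relaxation of the component's arcs until no relaxation fires.
--     INF = 10 ** 4 + 1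
--     G = defaultdict(set)
--     for u, v in edges:
--         G[u].add(v)
--         G[v].add(u)
--     color = [0] * (n + 1)
--
--     def dfs(cur, col, nodes):
--         if color[cur] != 0:
--             return color[cur] == col
--         color[cur] = col
--         nodes.append(cur)
--         for i in G[cur]:
--             if not dfs(i, -1 * col, nodes):
--                 return False
--         return True
--
--     def depths(src, comp):
--         # relax the component's arcs until stable (Bellman-Ford / Gauss-Seidel)
--         d = [INF] * (n + 1)
--         d[src] = 1
--         changed = True
--         while changed:
--             changed = False
--             for u in comp:
--                 for v in G[u]:
--                     if d[u] + 1 < d[v]: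
--                         d[v] = d[u] + 1
--                         changed = True
--         return d
--
--     ans = 0
--     for i in range(1, n + 1):
--         if color[i] == 0:
--             comp = []
--             if not dfs(i, 1, comp):
--                 return -1
--             best = 0
--             for u in comp:
--                 d = depths(u, comp)
--                 for v in comp:
--                     best = max(best, d[v])
--             ans += best
--     return ans
-- ===== Notes on version B (the rewrite author's own statement) =====
-- stated objective: alternative
-- what changed: B replaces A's queue-based BFS from every node into a precomputed (n+1)x(n+1) all-pairs matrix by Bellman-Ford-style relaxation: per component member it relaxes only that component's arcs until no relaxation fires and folds the maximum depth directly (no queue, no matrix, O(n) extra memory).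
-- outside the precondition, e.g. on magnificentSets2(1, [[0, 1]]): A returns 10001, B returns 2; on magnificentSets2(2, [[0, 1]]): A returns 10002, B returns 3
import Mathlib
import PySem

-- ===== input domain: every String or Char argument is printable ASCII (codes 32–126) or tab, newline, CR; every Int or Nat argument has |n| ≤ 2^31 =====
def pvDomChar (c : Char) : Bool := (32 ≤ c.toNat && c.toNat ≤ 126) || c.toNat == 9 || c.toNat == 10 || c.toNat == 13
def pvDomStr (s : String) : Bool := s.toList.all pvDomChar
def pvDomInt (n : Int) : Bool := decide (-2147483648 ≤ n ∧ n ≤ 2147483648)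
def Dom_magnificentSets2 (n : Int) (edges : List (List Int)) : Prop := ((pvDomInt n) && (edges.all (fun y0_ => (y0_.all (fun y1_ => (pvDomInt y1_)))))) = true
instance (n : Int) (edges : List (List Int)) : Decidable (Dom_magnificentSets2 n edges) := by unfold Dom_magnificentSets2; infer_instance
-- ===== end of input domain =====

-- B replaces A's queue-based BFS into an all-pairs distance matrix by Bellman-Ford-style
-- relaxation of each component's arcs until stable (alternative algorithm, no matrix, no queue).

-- ===== PORT A =====
-- A-side helpers (the adjacency build and the recursive bipartite coloring are
-- shared verbatim by both ports, as both Pythons contain them verbatim).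
-- G = defaultdict(set); for u,v in edges: G[u].add(v); G[v].add(u)
-- (defaultdict's creation of empty entries on lookup never changes any G[x] value,
--  so lookups are ported as getD ∅; rows of length ≠ 2 raise and are outside Pre_).
def pvAdj (edges : List (List Int)) : PySem.Dict Int (PySem.Set Int) :=
  edges.foldl (fun G e =>
    match e with
    | u :: v :: _ =>
        let G := G.insert u (PySem.Set.add (G.getD u PySem.Set.empty) v)
        G.insert v (PySem.Set.add (G.getD v PySem.Set.empty) u)
    | _ => G)  -- unpacking raises here in Python: outside Pre_
    PySem.Dict.empty

-- def dfs(cur, col, nodes) — state-passing port of the recursive coloring;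
-- fuel bounds the recursion depth (within Pre_ the depth is ≤ n+2, so the
-- fuel n+4 handed to it is never exhausted).  Python iterates the set G[cur]
-- in hash order; the loop's outcome (colors, success, node set) does not
-- depend on that order, and the port iterates the Set's element list.
mutual
def pvDfs (G : PySem.Dict Int (PySem.Set Int)) :
    Nat → Int → Int → List Int → List Int → (Bool × List Int × List Int)
  | 0, _, _, color, nodes => (false, color, nodes)   -- fuel guard, unreachable within Pre_
  | Nat.succ fuel, cur, col, color, nodes =>
    if PySem.List.pyGetD color cur 0 ≠ 0 then
      (PySem.List.pyGetD color cur 0 == col, color, nodes)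
    else
      let color := PySem.List.pySetD color cur col
      let nodes := nodes ++ [cur]
      pvDfsKids G fuel (G.getD cur PySem.Set.empty) (-1 * col) color nodes
termination_by fuel _ _ _ _ => (fuel, 0)

def pvDfsKids (G : PySem.Dict Int (PySem.Set Int)) :
    Nat → List Int → Int → List Int → List Int → (Bool × List Int × List Int)
  | _, [], _, color, nodes => (true, color, nodes)
  | fuel, i :: rest, col, color, nodes =>
    match pvDfs G fuel i col color nodes with
    | (ok, color, nodes) =>
      if ok then pvDfsKids G fuel rest col color nodes
      else (false, color, nodes)
termination_by fuel l _ _ _ => (fuel, l.length + 1)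
end

-- while que: u = que.popleft(); relax neighbours — relaxation loop on one
-- distance row; fuel bounds the number of pops (each append strictly decreases
-- a row entry, so within Pre_ at most (n+1)*10^4+n+1 pops happen and the fuel
-- (n+2)*10002 handed to it is never exhausted).
def pvBfs (G : PySem.Dict Int (PySem.Set Int)) :
    Nat → List Int → List Int → List Int
  | 0, _, dist => dist   -- fuel guard, unreachable within Pre_
  | Nat.succ _, [], dist => dist
  | Nat.succ fuel, u :: que, dist =>
      let s := (G.getD u PySem.Set.empty).foldl (fun (p : List Int × List Int) v =>
        if PySem.List.pyGetD p.1 v 0 > PySem.List.pyGetD p.1 u 0 + 1 then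
          (PySem.List.pySetD p.1 v (PySem.List.pyGetD p.1 u 0 + 1), p.2 ++ [v])
        else p) (dist, que)
      pvBfs G fuel s.2 s.1

def pvFuelDfs (n : Int) : Nat := n.toNat + 4
def pvFuelBfs (n : Int) : Nat := (n.toNat + 2) * 10002

-- def bfs(src): dist[src][src] = 1; … — bfs(src) touches only row src of the
-- matrix, ported as the functional update of that row.
def pvBfsA (G : PySem.Dict Int (PySem.Set Int)) (n : Int)
    (dist : List (List Int)) (src : Int) : List (List Int) :=
  PySem.List.pySetD dist src
    (pvBfs G (pvFuelBfs n) [src]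
      (PySem.List.pySetD (PySem.List.pyGetD dist src []) src 1))

-- the main loop of A: for i in range(1, n+1): … (early 'return -1' as recursion)
def pvMainA (G : PySem.Dict Int (PySem.Set Int)) (dist : List (List Int)) (fuel : Nat) :
    List Int → List Int → Int → Int
  | [], _, ans => ans
  | i :: rest, color, ans =>
    if PySem.List.pyGetD color i 0 == 0 then
      match pvDfs G fuel i 1 color [] with
      | (ok, color, kara) =>
        if !ok then -1
        else
          let mxdist := kara.foldl (fun m u => kara.foldl
            (fun m v => max m (PySem.List.pyGetD (PySem.List.pyGetD dist u []) v 0)) m) 0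
          pvMainA G dist fuel rest color (ans + mxdist)
    else pvMainA G dist fuel rest color ans

def magnificentSets2 (n : Int) (edges : List (List Int)) : Int :=
  let G := pvAdj edges
  let dist0 : List (List Int) :=
    List.replicate (n+1).toNat (List.replicate (n+1).toNat (10^4+1))
  let dist := (PySem.List.pyRange 1 (n+1) 1).foldl (pvBfsA G n) dist0
  let color : List Int := List.replicate (n+1).toNat 0
  pvMainA G dist (pvFuelDfs n) (PySem.List.pyRange 1 (n+1) 1) color 0

-- ===== PORT B =====
-- one pass of def depths(src, comp): 'for u in comp: for v in G[u]: relax' with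
-- the changed flag threaded through the accumulator.
def pvPass (G : PySem.Dict Int (PySem.Set Int)) (comp : List Int)
    (d : List Int) : List Int × Bool :=
  comp.foldl (fun s u =>
    (G.getD u PySem.Set.empty).foldl (fun (s : List Int × Bool) v =>
      if PySem.List.pyGetD s.1 u 0 + 1 < PySem.List.pyGetD s.1 v 0 then
        (PySem.List.pySetD s.1 v (PySem.List.pyGetD s.1 u 0 + 1), true)
      else s) s) (d, false)

-- while changed: … — repeat passes until one fires no relaxation; fuel bounds
-- the number of passes (each firing pass strictly lowers the row sum).
def pvBF (G : PySem.Dict Int (PySem.Set Int)) (comp : List Int) :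
    Nat → List Int → List Int
  | 0, d => d   -- fuel guard, unreachable within Pre_
  | Nat.succ fuel, d =>
      let s := pvPass G comp d
      if s.2 then pvBF G comp fuel s.1 else s.1

-- def depths(src, comp): fresh row, then relax the component's arcs until stable
def pvDepths (G : PySem.Dict Int (PySem.Set Int)) (n src : Int) (comp : List Int) : List Int :=
  pvBF G comp (pvFuelBfs n)
    (PySem.List.pySetD (List.replicate (n+1).toNat (10^4+1)) src 1)

def pvMainB (G : PySem.Dict Int (PySem.Set Int)) (n : Int) (fuel : Nat) :
    List Int → List Int → Int → Int
  | [], _, ans => ans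
  | i :: rest, color, ans =>
    if PySem.List.pyGetD color i 0 == 0 then
      match pvDfs G fuel i 1 color [] with
      | (ok, color, comp) =>
        if !ok then -1
        else
          let best := comp.foldl (fun b u =>
            let d := pvDepths G n u comp
            comp.foldl (fun b v => max b (PySem.List.pyGetD d v 0)) b) 0
          pvMainB G n fuel rest color (ans + best)
    else pvMainB G n fuel rest color ans

def magnificentSets2_alt (n : Int) (edges : List (List Int)) : Int :=
  let G := pvAdj edges
  let color : List Int := List.replicate (n+1).toNat 0
  pvMainB G n (pvFuelDfs n) (PySem.List.pyRange 1 (n+1) 1) color 0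

-- ===== PRECONDITION & SPEC =====
-- Pre_ admits every input on which A runs inside the problem's domain: edges are
-- pairs, and (when n ≥ 1) no edge mixes an id in 1..n with an out-of-domain id in
-- -(n+1)..0.  Outside Pre_ A either raises (IndexError/ValueError: ids beyond
-- -(n+1)..n, rows of length ≠ 2) or — on a mixed edge — its positionally-indexed
-- dist array aliases the out-of-domain id onto a different (or no) node's BFS row,
-- unspecified out-of-domain behaviour no caller would rely on (see cites).
def Pre_magnificentSets2 (n : Int) (edges : List (List Int)) : Prop :=
  (edges.all (fun e => e.length == 2 &&
    (decide (n ≤ 0)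
      || e.all (fun v => decide (1 ≤ v) && decide (v ≤ n))
      || e.all (fun v => decide (-(n+1) ≤ v) && decide (v ≤ 0))))) = true
instance (n : Int) (edges : List (List Int)) : Decidable (Pre_magnificentSets2 n edges) := by
  unfold Pre_magnificentSets2; infer_instance
def pvWitness_magnificentSets2 : Int × List (List Int) := (3, [[1,2],[2,3]])
def Spec_magnificentSets2 (n : Int) (edges : List (List Int)) (out : Int) : Prop := out = magnificentSets2_alt n edges
instance (n : Int) (edges : List (List Int)) (out : Int) : Decidable (Spec_magnificentSets2 n edges out) := by unfold Spec_magnificentSets2; infer_instance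

-- ===== CLAIM (what is proved, stated in full; the proofs are below) =====
def Claim_equal_magnificentSets2 : Prop := ∀ (n : Int) (edges : List (List Int)), Dom_magnificentSets2 n edges → Pre_magnificentSets2 n edges → Spec_magnificentSets2 n edges (magnificentSets2 n edges)

-- ===== LEMMAS AND PROOFS =====

-- reading/writing a possibly distinct index of a row (generic element type)
lemma pvGetSetSelf {α : Type} (xs : List α) (i : Int) (v dflt : α)
    (h0 : 0 ≤ i) (h : i < (xs.length : Int)) :
    PySem.List.pyGetD (PySem.List.pySetD xs i v) i dflt = v := by
  rw [PySem.List.pySetD_of_nonneg _ _ h0,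
    PySem.List.pyGetD_eq_getElem _ _ h0 (by simpa using h)]
  simp

lemma pvGetSetNe {α : Type} (xs : List α) (i j : Int) (v dflt : α)
    (hi : 0 ≤ i) (hj : 0 ≤ j) (hne : i ≠ j) (hjlen : j < (xs.length : Int)) :
    PySem.List.pyGetD (PySem.List.pySetD xs i v) j dflt = PySem.List.pyGetD xs j dflt := by
  rw [PySem.List.pySetD_of_nonneg _ _ hi,
    PySem.List.pyGetD_eq_getElem _ _ hj (by simpa using hjlen),
    PySem.List.pyGetD_eq_getElem _ _ hj hjlen]
  rw [List.getElem_set_ne (by omega : i.toNat ≠ j.toNat)]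

-- the Nat-valued sum of a row, the termination measure of both relaxation loops
def pvSum (d : List Int) : Nat := (d.map Int.toNat).sum

lemma pvSum_set (d : List Int) (j : Nat) (a : Int) (h : j < d.length) :
    pvSum (d.set j a) + d[j].toNat = pvSum d + a.toNat := by
  induction d generalizing j with
  | nil => simp at h
  | cons x xs ih =>
    cases j with
    | zero => simp [pvSum]; omega
    | succ j =>
      simp only [List.set_cons_succ, pvSum, List.map_cons, List.sum_cons,
        List.getElem_cons_succ]
      have := ih j (by simpa using h)
      simp only [pvSum] at this
      omega

lemma pvDictGetD_insert (d : PySem.Dict Int (PySem.Set Int)) (k k' : Int)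
    (v dflt : PySem.Set Int) :
    (d.insert k v).getD k' dflt = if k' = k then v else d.getD k' dflt := by
  by_cases h : k' = k
  · subst h; simp [PySem.Dict.getD, PySem.Dict.get?_insert_self]
  · simp [PySem.Dict.getD, PySem.Dict.get?_insert_of_ne _ _ h, h]

-- neighbours of an in-domain node stay inside 1..n
def pvAdjBnd (n : Int) (G : PySem.Dict Int (PySem.Set Int)) : Prop :=
  ∀ k x, x ∈ G.getD k PySem.Set.empty → 1 ≤ k ∧ k ≤ n → 1 ≤ x ∧ x ≤ n

lemma pvAdjBnd_of_bounds (n : Int) (edges : List (List Int))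
    (hp : ∀ e ∈ edges, ∀ u ∈ e, ∀ v ∈ e, 1 ≤ u ∧ u ≤ n → 1 ≤ v ∧ v ≤ n) :
    pvAdjBnd n (pvAdj edges) := by
  unfold pvAdj
  suffices h : ∀ (l : List (List Int)) (G : PySem.Dict Int (PySem.Set Int)),
      (∀ e ∈ l, ∀ u ∈ e, ∀ v ∈ e, 1 ≤ u ∧ u ≤ n → 1 ≤ v ∧ v ≤ n) → pvAdjBnd n G →
      pvAdjBnd n (l.foldl (fun G e =>
        match e with
        | u :: v :: _ =>
            let G := G.insert u (PySem.Set.add (G.getD u PySem.Set.empty) v)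
            G.insert v (PySem.Set.add (G.getD v PySem.Set.empty) u)
        | _ => G) G) by
    refine h edges PySem.Dict.empty hp ?_
    intro k x hx
    simp [PySem.Dict.getD, PySem.Dict.empty, PySem.Dict.get?] at hx
  intro l
  induction l with
  | nil => intro G _ hG; exact hG
  | cons e rest ih =>
    intro G hb hG
    have hp' := fun u hu => hb e List.mem_cons_self u hu
    refine ih _ (fun e' he' => hb e' (List.mem_cons_of_mem _ he')) ?_
    match e with
    | [] => exact hG
    | [u] => exact hG
    | u :: v :: tail =>
      have huv : 1 ≤ u ∧ u ≤ n → 1 ≤ v ∧ v ≤ n :=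
        hp' _ (List.mem_cons_self) _ (List.mem_cons_of_mem _ (List.mem_cons_self))
      have hvu : 1 ≤ v ∧ v ≤ n → 1 ≤ u ∧ u ≤ n :=
        hp' _ (List.mem_cons_of_mem _ (List.mem_cons_self)) _ (List.mem_cons_self)
      intro k x hx hk
      rw [pvDictGetD_insert] at hx
      split_ifs at hx with h1
      · subst h1
        rcases (PySem.Set.mem_add _ _ _).mp hx with hx' | rfl
        · rw [pvDictGetD_insert] at hx'
          split_ifs at hx' with h2
          · subst h2
            rcases (PySem.Set.mem_add _ _ _).mp hx' with hx'' | rfl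
            · exact hG _ _ hx'' hk
            · exact hk
          · exact hG _ _ hx' hk
        · exact hvu hk
      · rw [pvDictGetD_insert] at hx
        split_ifs at hx with h2
        · subst h2
          rcases (PySem.Set.mem_add _ _ _).mp hx with hx' | rfl
          · exact hG _ _ hx' hk
          · exact huv hk
        · exact hG _ _ hx hk

-- the adjacency dict built from undirected edges is symmetric
lemma pvAdjSym (edges : List (List Int)) :
    ∀ a b, b ∈ (pvAdj edges).getD a PySem.Set.empty →
      a ∈ (pvAdj edges).getD b PySem.Set.empty := by
  unfold pvAdj
  suffices h : ∀ (l : List (List Int)) (G : PySem.Dict Int (PySem.Set Int)),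
      (∀ a b, b ∈ G.getD a PySem.Set.empty → a ∈ G.getD b PySem.Set.empty) →
      ∀ a b, b ∈ (l.foldl (fun G e =>
        match e with
        | u :: v :: _ =>
            let G := G.insert u (PySem.Set.add (G.getD u PySem.Set.empty) v)
            G.insert v (PySem.Set.add (G.getD v PySem.Set.empty) u)
        | _ => G) G).getD a PySem.Set.empty →
      a ∈ (l.foldl (fun G e =>
        match e with
        | u :: v :: _ =>
            let G := G.insert u (PySem.Set.add (G.getD u PySem.Set.empty) v)
            G.insert v (PySem.Set.add (G.getD v PySem.Set.empty) u)
        | _ => G) G).getD b PySem.Set.empty by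
    refine h edges PySem.Dict.empty ?_
    intro a b hb
    simp [PySem.Dict.getD, PySem.Dict.empty, PySem.Dict.get?] at hb
  intro l
  induction l with
  | nil => intro G hG; exact hG
  | cons e rest ih =>
    intro G hG
    refine ih _ ?_
    match e with
    | [] => exact hG
    | [u] => exact hG
    | u :: v :: tail =>
      have hmem : ∀ y x, x ∈ ((G.insert u (PySem.Set.add (G.getD u PySem.Set.empty) v)).insert v
            (PySem.Set.add ((G.insert u (PySem.Set.add (G.getD u PySem.Set.empty) v)).getD v
              PySem.Set.empty) u)).getD y PySem.Set.empty ↔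
          x ∈ G.getD y PySem.Set.empty ∨ (y = u ∧ x = v) ∨ (y = v ∧ x = u) := by
        intro y x
        rw [pvDictGetD_insert]
        split_ifs with h1
        · subst h1
          rw [PySem.Set.mem_add, pvDictGetD_insert]
          split_ifs with h2
          · subst h2
            rw [PySem.Set.mem_add]
            tauto
          · tauto
        · rw [pvDictGetD_insert]
          split_ifs with h2
          · subst h2
            rw [PySem.Set.mem_add]
            tauto
          · tauto
      intro a b hb
      rw [hmem] at hb
      rw [hmem]
      rcases hb with hb | ⟨rfl, rfl⟩ | ⟨rfl, rfl⟩
      · exact Or.inl (hG a b hb)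
      · tauto
      · tauto

-- the fresh distance row both relaxation loops start from
def pvInit (n src : Int) : List Int :=
  PySem.List.pySetD (List.replicate (n+1).toNat (10^4+1)) src 1

-- the BFS row A computes for source src (proof-side name)
def pvRowB (G : PySem.Dict Int (PySem.Set Int)) (n src : Int) : List Int :=
  pvBfs G (pvFuelBfs n) [src] (pvInit n src)

-- rows reachable from pvInit by single relaxations of the component's arcs
inductive pvReach (G : PySem.Dict Int (PySem.Set Int)) (comp : List Int) (n src : Int) :
    List Int → Prop
  | init : pvReach G comp n src (pvInit n src)
  | step {d : List Int} {u v : Int} : pvReach G comp n src d → u ∈ comp →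
      v ∈ G.getD u PySem.Set.empty →
      PySem.List.pyGetD d u 0 + 1 < PySem.List.pyGetD d v 0 →
      pvReach G comp n src (PySem.List.pySetD d v (PySem.List.pyGetD d u 0 + 1))

lemma pvReach_length (G : PySem.Dict Int (PySem.Set Int)) (comp : List Int) (n src : Int)
    {d : List Int} (h : pvReach G comp n src d) : d.length = (n+1).toNat := by
  induction h with
  | init => simp [pvInit, PySem.List.length_pySetD]
  | step _ _ _ _ ih => simp [PySem.List.length_pySetD, ih]

lemma pvInit_get (n src : Int) (hs : 1 ≤ src ∧ src ≤ n) (j : Int)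
    (h0 : 0 ≤ j) (h1 : j ≤ n) :
    PySem.List.pyGetD (pvInit n src) j 0 = if j = src then 1 else 10001 := by
  have hlen : ((List.replicate (n+1).toNat ((10:Int)^4+1)).length : Int) = n + 1 := by
    simp; omega
  split_ifs with h
  · subst h
    exact pvGetSetSelf _ _ _ _ (by omega) (by rw [hlen]; omega)
  · rw [pvInit, pvGetSetNe _ _ _ _ _ (by omega) h0 (fun he => h he.symm) (by rw [hlen]; omega)]
    rw [PySem.List.pyGetD_eq_getElem _ _ h0 (by rw [hlen]; omega)]
    simp

lemma pvReach_bounds (G : PySem.Dict Int (PySem.Set Int)) (comp : List Int) (n src : Int)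
    (hG : pvAdjBnd n G) (hc1 : ∀ x ∈ comp, 1 ≤ x ∧ x ≤ n) (hs : 1 ≤ src ∧ src ≤ n)
    {d : List Int} (h : pvReach G comp n src d) :
    ∀ j : Int, 0 ≤ j → j ≤ n →
      1 ≤ PySem.List.pyGetD d j 0 ∧ PySem.List.pyGetD d j 0 ≤ 10001 := by
  induction h with
  | init =>
    intro j h0 h1
    rw [pvInit_get n src hs j h0 h1]
    split_ifs <;> omega
  | @step d u v hd hu hv hlt ih =>
    intro j h0 h1
    have hub := hc1 u hu
    have hvb := hG u v hv hub
    have hlen : (d.length : Int) = n + 1 := by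
      rw [pvReach_length G comp n src hd]; simp; omega
    by_cases hjv : v = j
    · subst hjv
      rw [pvGetSetSelf _ _ _ _ (by omega) (by omega)]
      have h1 := ih u (by omega) (by omega)
      have h2 := ih v (by omega) (by omega)
      omega
    · rw [pvGetSetNe _ _ _ _ _ (by omega) h0 hjv (by omega)]
      exact ih j h0 h1

lemma pvReach_le_init (G : PySem.Dict Int (PySem.Set Int)) (comp : List Int) (n src : Int)
    (hG : pvAdjBnd n G) (hc1 : ∀ x ∈ comp, 1 ≤ x ∧ x ≤ n) (hs : 1 ≤ src ∧ src ≤ n)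
    {d : List Int} (h : pvReach G comp n src d) :
    ∀ j : Int, 0 ≤ j → j ≤ n →
      PySem.List.pyGetD d j 0 ≤ PySem.List.pyGetD (pvInit n src) j 0 := by
  induction h with
  | init => intro j _ _; exact le_rfl
  | @step d u v hd hu hv hlt ih =>
    intro j h0 h1
    have hub := hc1 u hu
    have hvb := hG u v hv hub
    have hlen : (d.length : Int) = n + 1 := by
      rw [pvReach_length G comp n src hd]; simp; omega
    by_cases hjv : v = j
    · subst hjv
      rw [pvGetSetSelf _ _ _ _ (by omega) (by omega)]
      have := ih v (by omega) (by omega)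
      omega
    · rw [pvGetSetNe _ _ _ _ _ (by omega) h0 hjv (by omega)]
      exact ih j h0 h1

-- a reachable fixpoint is below every reachable row
lemma pvFix_le (G : PySem.Dict Int (PySem.Set Int)) (comp : List Int) (n src : Int)
    (hG : pvAdjBnd n G) (hc1 : ∀ x ∈ comp, 1 ≤ x ∧ x ≤ n) (hs : 1 ≤ src ∧ src ≤ n)
    {f : List Int} (hf : pvReach G comp n src f)
    (hfix : ∀ u ∈ comp, ∀ v ∈ G.getD u PySem.Set.empty,
      PySem.List.pyGetD f v 0 ≤ PySem.List.pyGetD f u 0 + 1)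
    {d : List Int} (hd : pvReach G comp n src d) :
    ∀ j : Int, 0 ≤ j → j ≤ n →
      PySem.List.pyGetD f j 0 ≤ PySem.List.pyGetD d j 0 := by
  induction hd with
  | init => exact pvReach_le_init G comp n src hG hc1 hs hf
  | @step d u v hd' hu hv hlt ih =>
    intro j h0 h1
    have hub := hc1 u hu
    have hvb := hG u v hv hub
    have hlen : (d.length : Int) = n + 1 := by
      rw [pvReach_length G comp n src hd']; simp; omega
    by_cases hjv : v = j
    · subst hjv
      rw [pvGetSetSelf _ _ _ _ (by omega) (by omega)]
      have h1 := hfix u hu v hv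
      have h2 := ih u (by omega) (by omega)
      omega
    · rw [pvGetSetNe _ _ _ _ _ (by omega) h0 hjv (by omega)]
      exact ih j h0 h1

-- two reachable fixpoints agree on every in-range index
lemma pvReachFix_unique (G : PySem.Dict Int (PySem.Set Int)) (comp : List Int) (n src : Int)
    (hG : pvAdjBnd n G) (hc1 : ∀ x ∈ comp, 1 ≤ x ∧ x ≤ n) (hs : 1 ≤ src ∧ src ≤ n)
    {f1 f2 : List Int} (h1 : pvReach G comp n src f1) (h2 : pvReach G comp n src f2)
    (hfix1 : ∀ u ∈ comp, ∀ v ∈ G.getD u PySem.Set.empty,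
      PySem.List.pyGetD f1 v 0 ≤ PySem.List.pyGetD f1 u 0 + 1)
    (hfix2 : ∀ u ∈ comp, ∀ v ∈ G.getD u PySem.Set.empty,
      PySem.List.pyGetD f2 v 0 ≤ PySem.List.pyGetD f2 u 0 + 1) :
    ∀ j : Int, 0 ≤ j → j ≤ n →
      PySem.List.pyGetD f1 j 0 = PySem.List.pyGetD f2 j 0 := by
  intro j h0 h1'
  exact le_antisymm
    (pvFix_le G comp n src hG hc1 hs h1 hfix1 h2 j h0 h1')
    (pvFix_le G comp n src hG hc1 hs h2 hfix2 h1 j h0 h1')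

-- the inner relaxation fold of A's BFS: invariant, queue membership, and the measure
lemma pvBfsFold (G : PySem.Dict Int (PySem.Set Int)) (comp : List Int) (n src : Int)
    (hG : pvAdjBnd n G) (hc1 : ∀ x ∈ comp, 1 ≤ x ∧ x ≤ n)
    (hc2 : ∀ u ∈ comp, ∀ v ∈ G.getD u PySem.Set.empty, v ∈ comp)
    (hs : 1 ≤ src ∧ src ≤ n) (u : Int) (hu : u ∈ comp) :
    ∀ (vs : List Int), (∀ v ∈ vs, v ∈ G.getD u PySem.Set.empty) →
    ∀ (d que : List Int), pvReach G comp n src d → (∀ q ∈ que, q ∈ comp) →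
    (∀ w ∈ comp, ∀ x ∈ G.getD w PySem.Set.empty,
      PySem.List.pyGetD d x 0 ≤ PySem.List.pyGetD d w 0 + 1 ∨ w ∈ que ∨ (w = u ∧ x ∈ vs)) →
    pvReach G comp n src (vs.foldl (fun (p : List Int × List Int) v =>
        if PySem.List.pyGetD p.1 v 0 > PySem.List.pyGetD p.1 u 0 + 1 then
          (PySem.List.pySetD p.1 v (PySem.List.pyGetD p.1 u 0 + 1), p.2 ++ [v])
        else p) (d, que)).1 ∧
    (∀ q ∈ (vs.foldl (fun (p : List Int × List Int) v =>
        if PySem.List.pyGetD p.1 v 0 > PySem.List.pyGetD p.1 u 0 + 1 then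
          (PySem.List.pySetD p.1 v (PySem.List.pyGetD p.1 u 0 + 1), p.2 ++ [v])
        else p) (d, que)).2, q ∈ comp) ∧
    (∀ w ∈ comp, ∀ x ∈ G.getD w PySem.Set.empty,
      PySem.List.pyGetD (vs.foldl (fun (p : List Int × List Int) v =>
        if PySem.List.pyGetD p.1 v 0 > PySem.List.pyGetD p.1 u 0 + 1 then
          (PySem.List.pySetD p.1 v (PySem.List.pyGetD p.1 u 0 + 1), p.2 ++ [v])
        else p) (d, que)).1 x 0 ≤
      PySem.List.pyGetD (vs.foldl (fun (p : List Int × List Int) v =>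
        if PySem.List.pyGetD p.1 v 0 > PySem.List.pyGetD p.1 u 0 + 1 then
          (PySem.List.pySetD p.1 v (PySem.List.pyGetD p.1 u 0 + 1), p.2 ++ [v])
        else p) (d, que)).1 w 0 + 1 ∨ w ∈ (vs.foldl (fun (p : List Int × List Int) v =>
        if PySem.List.pyGetD p.1 v 0 > PySem.List.pyGetD p.1 u 0 + 1 then
          (PySem.List.pySetD p.1 v (PySem.List.pyGetD p.1 u 0 + 1), p.2 ++ [v])
        else p) (d, que)).2) ∧
    (vs.foldl (fun (p : List Int × List Int) v =>
        if PySem.List.pyGetD p.1 v 0 > PySem.List.pyGetD p.1 u 0 + 1 then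
          (PySem.List.pySetD p.1 v (PySem.List.pyGetD p.1 u 0 + 1), p.2 ++ [v])
        else p) (d, que)).2.length + pvSum (vs.foldl (fun (p : List Int × List Int) v =>
        if PySem.List.pyGetD p.1 v 0 > PySem.List.pyGetD p.1 u 0 + 1 then
          (PySem.List.pySetD p.1 v (PySem.List.pyGetD p.1 u 0 + 1), p.2 ++ [v])
        else p) (d, que)).1 ≤ que.length + pvSum d := by
  intro vs
  induction vs with
  | nil =>
    intro _ d que hreach hque hinv
    refine ⟨hreach, hque, ?_, le_rfl⟩
    intro w hw x hx
    rcases hinv w hw x hx with h | h | ⟨_, h⟩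
    · exact Or.inl h
    · exact Or.inr h
    · cases h
  | cons v vs ih =>
    intro hvs d que hreach hque hinv
    have hv : v ∈ G.getD u PySem.Set.empty := hvs v List.mem_cons_self
    have hub := hc1 u hu
    have hvb := hG u v hv hub
    have hlen : (d.length : Int) = n + 1 := by
      rw [pvReach_length G comp n src hreach]; simp; omega
    rw [List.foldl_cons]
    by_cases hfire : PySem.List.pyGetD d v 0 > PySem.List.pyGetD d u 0 + 1
    · simp only [if_pos hfire]
      have hvne : v ≠ u := by
        intro h; rw [h] at hfire; omega
      set a := PySem.List.pyGetD d u 0 + 1 with ha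
      set d' := PySem.List.pySetD d v a with hd'
      have hreach' : pvReach G comp n src d' := pvReach.step hreach hu hv hfire
      have hget_self : PySem.List.pyGetD d' v 0 = a :=
        pvGetSetSelf _ _ _ _ (by omega) (by omega)
      have hget_ne : ∀ j : Int, 0 ≤ j → j ≤ n → j ≠ v →
          PySem.List.pyGetD d' j 0 = PySem.List.pyGetD d j 0 := by
        intro j h0 h1 hne
        exact pvGetSetNe _ _ _ _ _ (by omega) h0 (fun he => hne he.symm) (by omega)
      have hque' : ∀ q ∈ que ++ [v], q ∈ comp := by
        intro q hq
        rcases List.mem_append.mp hq with hq | hq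
        · exact hque q hq
        · have hqv := List.mem_singleton.mp hq
          rw [hqv]; exact hc2 u hu v hv
      have hbnd := pvReach_bounds G comp n src hG hc1 hs hreach
      have hinv' : ∀ w ∈ comp, ∀ x ∈ G.getD w PySem.Set.empty,
          PySem.List.pyGetD d' x 0 ≤ PySem.List.pyGetD d' w 0 + 1 ∨
          w ∈ que ++ [v] ∨ (w = u ∧ x ∈ vs) := by
        intro w hw x hx
        have hwb := hc1 w hw
        have hxb := hG w x hx hwb
        by_cases hwv : w = v
        · exact Or.inr (Or.inl (by simp [hwv]))
        · have hgw : PySem.List.pyGetD d' w 0 = PySem.List.pyGetD d w 0 :=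
            hget_ne w (by omega) (by omega) hwv
          rcases hinv w hw x hx with h | h | ⟨rfl, hxvs⟩
          · by_cases hxv : x = v
            · subst hxv
              refine Or.inl ?_
              rw [hget_self, hgw]
              have := hbnd u (by omega) (by omega)
              omega
            · refine Or.inl ?_
              rw [hgw, hget_ne x (by omega) (by omega) hxv]
              exact h
          · exact Or.inr (Or.inl (List.mem_append_left _ h))
          · rcases List.mem_cons.mp hxvs with rfl | hxvs'
            · refine Or.inl ?_
              rw [hget_self, hgw]
            · exact Or.inr (Or.inr ⟨rfl, hxvs'⟩)
      have hsum : pvSum d' + 1 ≤ pvSum d := by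
        have hvlt : v.toNat < d.length := by omega
        have hset : d' = d.set v.toNat a := by
          rw [hd', PySem.List.pySetD_of_nonneg _ _ (by omega : (0:Int) ≤ v)]
        have hgv : d[v.toNat] = PySem.List.pyGetD d v 0 :=
          (PySem.List.pyGetD_eq_getElem _ _ (by omega) (by omega)).symm
        have := pvSum_set d v.toNat a hvlt
        have ha1 : 1 ≤ a := by
          have := hbnd u (by omega) (by omega)
          omega
        rw [hgv] at this
        rw [hset]
        omega
      have := ih (fun x hx => hvs x (List.mem_cons_of_mem _ hx)) d' (que ++ [v])
        hreach' hque' hinv'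
      refine ⟨this.1, this.2.1, this.2.2.1, ?_⟩
      have hle := this.2.2.2
      simp only [List.length_append, List.length_singleton] at hle
      omega
    · simp only [if_neg hfire]
      refine ih (fun x hx => hvs x (List.mem_cons_of_mem _ hx)) d que hreach hque ?_
      intro w hw x hx
      rcases hinv w hw x hx with h | h | ⟨rfl, hxvs⟩
      · exact Or.inl h
      · exact Or.inr (Or.inl h)
      · rcases List.mem_cons.mp hxvs with rfl | hxvs'
        · exact Or.inl (by omega)
        · exact Or.inr (Or.inr ⟨rfl, hxvs'⟩)

-- A's queue loop terminates within its fuel and returns a reachable fixpoint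
lemma pvBfs_done (G : PySem.Dict Int (PySem.Set Int)) (comp : List Int) (n src : Int)
    (hG : pvAdjBnd n G) (hc1 : ∀ x ∈ comp, 1 ≤ x ∧ x ≤ n)
    (hc2 : ∀ u ∈ comp, ∀ v ∈ G.getD u PySem.Set.empty, v ∈ comp)
    (hs : 1 ≤ src ∧ src ≤ n) :
    ∀ (fuel : Nat) (que d : List Int), pvReach G comp n src d →
    (∀ q ∈ que, q ∈ comp) →
    (∀ w ∈ comp, ∀ x ∈ G.getD w PySem.Set.empty,
      PySem.List.pyGetD d x 0 ≤ PySem.List.pyGetD d w 0 + 1 ∨ w ∈ que) →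
    que.length + pvSum d < fuel →
    pvReach G comp n src (pvBfs G fuel que d) ∧
    (∀ u ∈ comp, ∀ v ∈ G.getD u PySem.Set.empty,
      PySem.List.pyGetD (pvBfs G fuel que d) v 0 ≤
      PySem.List.pyGetD (pvBfs G fuel que d) u 0 + 1) := by
  intro fuel
  induction fuel with
  | zero => intro que d _ _ _ hlt; omega
  | succ fuel ihf =>
    intro que d hreach hque hinv hlt
    cases que with
    | nil =>
      rw [pvBfs]
      refine ⟨hreach, ?_⟩
      intro u hu v hv
      rcases hinv u hu v hv with h | h
      · exact h
      · cases h
    | cons u rest =>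
      rw [pvBfs]
      have hu : u ∈ comp := hque u List.mem_cons_self
      have hfold := pvBfsFold G comp n src hG hc1 hc2 hs u hu
        (G.getD u PySem.Set.empty) (fun v hv => hv) d rest hreach
        (fun q hq => hque q (List.mem_cons_of_mem _ hq)) ?_
      · refine ihf _ _ hfold.1 hfold.2.1 hfold.2.2.1 ?_
        have := hfold.2.2.2
        simp only [List.length_cons] at hlt
        omega
      · intro w hw x hx
        rcases hinv w hw x hx with h | h
        · exact Or.inl h
        · rcases List.mem_cons.mp h with rfl | h'
          · exact Or.inr (Or.inr ⟨rfl, hx⟩)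
          · exact Or.inr (Or.inl h')

-- the inner relaxation fold of one of B's passes (u fixed)
lemma pvPassInner (G : PySem.Dict Int (PySem.Set Int)) (comp : List Int) (n src : Int)
    (hG : pvAdjBnd n G) (hc1 : ∀ x ∈ comp, 1 ≤ x ∧ x ≤ n)
    (hs : 1 ≤ src ∧ src ≤ n) (u : Int) (hu : u ∈ comp) :
    ∀ (vs : List Int), (∀ v ∈ vs, v ∈ G.getD u PySem.Set.empty) →
    ∀ (d : List Int) (flag : Bool), pvReach G comp n src d →
    pvReach G comp n src (vs.foldl (fun (s : List Int × Bool) v =>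
      if PySem.List.pyGetD s.1 u 0 + 1 < PySem.List.pyGetD s.1 v 0 then
        (PySem.List.pySetD s.1 v (PySem.List.pyGetD s.1 u 0 + 1), true)
      else s) (d, flag)).1 ∧
    pvSum (vs.foldl (fun (s : List Int × Bool) v =>
      if PySem.List.pyGetD s.1 u 0 + 1 < PySem.List.pyGetD s.1 v 0 then
        (PySem.List.pySetD s.1 v (PySem.List.pyGetD s.1 u 0 + 1), true)
      else s) (d, flag)).1 ≤ pvSum d ∧
    ((vs.foldl (fun (s : List Int × Bool) v =>
      if PySem.List.pyGetD s.1 u 0 + 1 < PySem.List.pyGetD s.1 v 0 then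
        (PySem.List.pySetD s.1 v (PySem.List.pyGetD s.1 u 0 + 1), true)
      else s) (d, flag)).2 = false → flag = false ∧ (vs.foldl (fun (s : List Int × Bool) v =>
      if PySem.List.pyGetD s.1 u 0 + 1 < PySem.List.pyGetD s.1 v 0 then
        (PySem.List.pySetD s.1 v (PySem.List.pyGetD s.1 u 0 + 1), true)
      else s) (d, flag)).1 = d ∧
      ∀ v ∈ vs, ¬(PySem.List.pyGetD d u 0 + 1 < PySem.List.pyGetD d v 0)) ∧
    (flag = false → (vs.foldl (fun (s : List Int × Bool) v =>
      if PySem.List.pyGetD s.1 u 0 + 1 < PySem.List.pyGetD s.1 v 0 then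
        (PySem.List.pySetD s.1 v (PySem.List.pyGetD s.1 u 0 + 1), true)
      else s) (d, flag)).2 = true → pvSum (vs.foldl (fun (s : List Int × Bool) v =>
      if PySem.List.pyGetD s.1 u 0 + 1 < PySem.List.pyGetD s.1 v 0 then
        (PySem.List.pySetD s.1 v (PySem.List.pyGetD s.1 u 0 + 1), true)
      else s) (d, flag)).1 < pvSum d) := by
  intro vs
  induction vs with
  | nil =>
    intro _ d flag hreach
    refine ⟨hreach, le_rfl, ?_, ?_⟩
    · intro hf
      exact ⟨hf, rfl, by intro v hv; cases hv⟩
    · intro h1 h2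
      rw [h1] at h2
      cases h2
  | cons v vs ih =>
    intro hvs d flag hreach
    have hv : v ∈ G.getD u PySem.Set.empty := hvs v List.mem_cons_self
    have hub := hc1 u hu
    have hvb := hG u v hv hub
    have hlen : (d.length : Int) = n + 1 := by
      rw [pvReach_length G comp n src hreach]; simp; omega
    have hbnd := pvReach_bounds G comp n src hG hc1 hs hreach
    rw [List.foldl_cons]
    by_cases hfire : PySem.List.pyGetD d u 0 + 1 < PySem.List.pyGetD d v 0
    · simp only [if_pos hfire]
      set a := PySem.List.pyGetD d u 0 + 1 with ha
      set d' := PySem.List.pySetD d v a with hd'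
      have hreach' : pvReach G comp n src d' := pvReach.step hreach hu hv hfire
      have hsum : pvSum d' < pvSum d := by
        have hvlt : v.toNat < d.length := by omega
        have hset : d' = d.set v.toNat a := by
          rw [hd', PySem.List.pySetD_of_nonneg _ _ (by omega : (0:Int) ≤ v)]
        have hgv : d[v.toNat] = PySem.List.pyGetD d v 0 :=
          (PySem.List.pyGetD_eq_getElem _ _ (by omega) (by omega)).symm
        have hss := pvSum_set d v.toNat a hvlt
        have ha1 : 1 ≤ a := by
          have := hbnd u (by omega) (by omega)
          omega
        rw [hgv] at hss
        rw [hset]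
        omega
      have := ih (fun x hx => hvs x (List.mem_cons_of_mem _ hx)) d' true hreach'
      refine ⟨this.1, le_trans this.2.1 (le_of_lt hsum), ?_, ?_⟩
      · intro hf
        rcases (this.2.2.1 hf) with ⟨hft, _⟩
        cases hft
      · intro _ _
        exact lt_of_le_of_lt this.2.1 hsum
    · simp only [if_neg hfire]
      have := ih (fun x hx => hvs x (List.mem_cons_of_mem _ hx)) d flag hreach
      refine ⟨this.1, this.2.1, ?_, this.2.2.2⟩
      intro hf
      rcases this.2.2.1 hf with ⟨h1, h2, h3⟩
      refine ⟨h1, h2, ?_⟩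
      intro x hx
      rcases List.mem_cons.mp hx with rfl | hx'
      · exact hfire
      · exact h3 x hx'

-- one full pass of B: reachability, the monotone measure, and the stability reading
lemma pvPassOuter (G : PySem.Dict Int (PySem.Set Int)) (comp : List Int) (n src : Int)
    (hG : pvAdjBnd n G) (hc1 : ∀ x ∈ comp, 1 ≤ x ∧ x ≤ n)
    (hs : 1 ≤ src ∧ src ≤ n) :
    ∀ (l : List Int), (∀ x ∈ l, x ∈ comp) →
    ∀ (d : List Int) (flag : Bool), pvReach G comp n src d →
    pvReach G comp n src (l.foldl (fun s u =>
      (G.getD u PySem.Set.empty).foldl (fun (s : List Int × Bool) v =>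
        if PySem.List.pyGetD s.1 u 0 + 1 < PySem.List.pyGetD s.1 v 0 then
          (PySem.List.pySetD s.1 v (PySem.List.pyGetD s.1 u 0 + 1), true)
        else s) s) (d, flag)).1 ∧
    pvSum (l.foldl (fun s u =>
      (G.getD u PySem.Set.empty).foldl (fun (s : List Int × Bool) v =>
        if PySem.List.pyGetD s.1 u 0 + 1 < PySem.List.pyGetD s.1 v 0 then
          (PySem.List.pySetD s.1 v (PySem.List.pyGetD s.1 u 0 + 1), true)
        else s) s) (d, flag)).1 ≤ pvSum d ∧
    ((l.foldl (fun s u =>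
      (G.getD u PySem.Set.empty).foldl (fun (s : List Int × Bool) v =>
        if PySem.List.pyGetD s.1 u 0 + 1 < PySem.List.pyGetD s.1 v 0 then
          (PySem.List.pySetD s.1 v (PySem.List.pyGetD s.1 u 0 + 1), true)
        else s) s) (d, flag)).2 = false → flag = false ∧ (l.foldl (fun s u =>
      (G.getD u PySem.Set.empty).foldl (fun (s : List Int × Bool) v =>
        if PySem.List.pyGetD s.1 u 0 + 1 < PySem.List.pyGetD s.1 v 0 then
          (PySem.List.pySetD s.1 v (PySem.List.pyGetD s.1 u 0 + 1), true)
        else s) s) (d, flag)).1 = d ∧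
      ∀ u ∈ l, ∀ v ∈ G.getD u PySem.Set.empty,
        ¬(PySem.List.pyGetD d u 0 + 1 < PySem.List.pyGetD d v 0)) ∧
    (flag = false → (l.foldl (fun s u =>
      (G.getD u PySem.Set.empty).foldl (fun (s : List Int × Bool) v =>
        if PySem.List.pyGetD s.1 u 0 + 1 < PySem.List.pyGetD s.1 v 0 then
          (PySem.List.pySetD s.1 v (PySem.List.pyGetD s.1 u 0 + 1), true)
        else s) s) (d, flag)).2 = true → pvSum (l.foldl (fun s u =>
      (G.getD u PySem.Set.empty).foldl (fun (s : List Int × Bool) v =>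
        if PySem.List.pyGetD s.1 u 0 + 1 < PySem.List.pyGetD s.1 v 0 then
          (PySem.List.pySetD s.1 v (PySem.List.pyGetD s.1 u 0 + 1), true)
        else s) s) (d, flag)).1 < pvSum d) := by
  intro l
  induction l with
  | nil =>
    intro _ d flag hreach
    refine ⟨hreach, le_rfl, ?_, ?_⟩
    · intro hf
      exact ⟨hf, rfl, by intro u hu; cases hu⟩
    · intro h1 h2
      rw [h1] at h2
      cases h2
  | cons u l ih =>
    intro hl d flag hreach
    have hu : u ∈ comp := hl u List.mem_cons_self
    have hinner := pvPassInner G comp n src hG hc1 hs u hu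
      (G.getD u PySem.Set.empty) (fun v hv => hv) d flag hreach
    rw [List.foldl_cons]
    rcases hst : ((G.getD u PySem.Set.empty).foldl (fun (s : List Int × Bool) v =>
        if PySem.List.pyGetD s.1 u 0 + 1 < PySem.List.pyGetD s.1 v 0 then
          (PySem.List.pySetD s.1 v (PySem.List.pyGetD s.1 u 0 + 1), true)
        else s) (d, flag)) with ⟨d1, flag1⟩
    rw [hst] at hinner
    have ihres := ih (fun x hx => hl x (List.mem_cons_of_mem _ hx)) d1 flag1 hinner.1
    refine ⟨ihres.1, le_trans ihres.2.1 hinner.2.1, ?_, ?_⟩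
    · intro hf
      rcases ihres.2.2.1 hf with ⟨hf1, heq, harcs⟩
      rcases hinner.2.2.1 hf1 with ⟨hflag, heq1, harcsu⟩
      subst heq1
      exact ⟨hflag, heq, by
        intro w hw v hv
        rcases List.mem_cons.mp hw with rfl | hw'
        · exact harcsu v hv
        · exact harcs w hw' v hv⟩
    · intro hflag hftrue
      cases flag1 with
      | true =>
        have hstrict := hinner.2.2.2 hflag rfl
        exact lt_of_le_of_lt ihres.2.1 hstrict
      | false =>
        rcases hinner.2.2.1 rfl with ⟨_, heq1, _⟩
        subst heq1
        exact ihres.2.2.2 rfl hftrue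

-- B's pass loop terminates within its fuel and returns a reachable fixpoint
lemma pvBF_done (G : PySem.Dict Int (PySem.Set Int)) (comp : List Int) (n src : Int)
    (hG : pvAdjBnd n G) (hc1 : ∀ x ∈ comp, 1 ≤ x ∧ x ≤ n)
    (hs : 1 ≤ src ∧ src ≤ n) :
    ∀ (fuel : Nat) (d : List Int), pvReach G comp n src d → pvSum d < fuel →
    pvReach G comp n src (pvBF G comp fuel d) ∧
    (∀ u ∈ comp, ∀ v ∈ G.getD u PySem.Set.empty,
      PySem.List.pyGetD (pvBF G comp fuel d) v 0 ≤
      PySem.List.pyGetD (pvBF G comp fuel d) u 0 + 1) := by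
  intro fuel
  induction fuel with
  | zero => intro d _ hlt; omega
  | succ fuel ihf =>
    intro d hreach hlt
    have hpass := pvPassOuter G comp n src hG hc1 hs comp (fun x hx => hx) d false hreach
    have hbf : pvBF G comp (fuel+1) d =
        if (pvPass G comp d).2 then pvBF G comp fuel (pvPass G comp d).1
        else (pvPass G comp d).1 := rfl
    have hpassdef : pvPass G comp d = comp.foldl (fun s u =>
      (G.getD u PySem.Set.empty).foldl (fun (s : List Int × Bool) v =>
        if PySem.List.pyGetD s.1 u 0 + 1 < PySem.List.pyGetD s.1 v 0 then
          (PySem.List.pySetD s.1 v (PySem.List.pyGetD s.1 u 0 + 1), true)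
        else s) s) (d, false) := rfl
    rw [hbf, hpassdef]
    cases hfl : (comp.foldl (fun s u =>
      (G.getD u PySem.Set.empty).foldl (fun (s : List Int × Bool) v =>
        if PySem.List.pyGetD s.1 u 0 + 1 < PySem.List.pyGetD s.1 v 0 then
          (PySem.List.pySetD s.1 v (PySem.List.pyGetD s.1 u 0 + 1), true)
        else s) s) (d, false)).2 with
    | true =>
      simp only [if_true]
      have hstrict := hpass.2.2.2 rfl hfl
      exact ihf _ hpass.1 (by omega)
    | false =>
      simp only [Bool.false_eq_true, if_false]
      rcases hpass.2.2.1 hfl with ⟨_, heq, harcs⟩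
      rw [heq]
      refine ⟨hreach, ?_⟩
      intro u hu v hv
      have := harcs u hu v hv
      omega

-- the initial row sum is well below both fuels
lemma pvSum_init_lt (n src : Int) (hs : 1 ≤ src ∧ src ≤ n) :
    1 + pvSum (pvInit n src) < pvFuelBfs n := by
  have hrep : pvSum (List.replicate (n+1).toNat ((10:Int)^4+1)) = (n+1).toNat * 10001 := by
    simp [pvSum, List.map_replicate, List.sum_replicate]
  have hsl : src.toNat < (List.replicate (n+1).toNat ((10:Int)^4+1)).length := by
    simp; omega
  have hset : pvInit n src = (List.replicate (n+1).toNat ((10:Int)^4+1)).set src.toNat 1 := by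
    rw [pvInit, PySem.List.pySetD_of_nonneg _ _ (by omega : (0:Int) ≤ src)]
  have hss := pvSum_set (List.replicate (n+1).toNat ((10:Int)^4+1)) src.toNat 1 hsl
  have hgv : (List.replicate (n+1).toNat ((10:Int)^4+1))[src.toNat]'hsl = 10^4+1 := by
    simp
  rw [hgv, hrep] at hss
  rw [← hset] at hss
  have hm : (n+1).toNat = n.toNat + 1 := by omega
  rw [hm] at hss
  unfold pvFuelBfs
  norm_num at hss ⊢
  omega

-- the component's closure makes A's BFS row and B's stabilised row agree
lemma pvRow_eq (G : PySem.Dict Int (PySem.Set Int)) (comp : List Int) (n src : Int)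
    (hG : pvAdjBnd n G) (hc1 : ∀ x ∈ comp, 1 ≤ x ∧ x ≤ n)
    (hc2 : ∀ u ∈ comp, ∀ v ∈ G.getD u PySem.Set.empty, v ∈ comp)
    (hsrc : src ∈ comp) :
    ∀ j : Int, 0 ≤ j → j ≤ n →
      PySem.List.pyGetD (pvRowB G n src) j 0 =
      PySem.List.pyGetD (pvDepths G n src comp) j 0 := by
  have hs := hc1 src hsrc
  have hfuel := pvSum_init_lt n src hs
  have hA := pvBfs_done G comp n src hG hc1 hc2 hs (pvFuelBfs n) [src] (pvInit n src)
    pvReach.init (by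
      intro q hq
      have hqv := List.mem_singleton.mp hq
      rw [hqv]; exact hsrc) ?_ ?_
  · have hB := pvBF_done G comp n src hG hc1 hs (pvFuelBfs n) (pvInit n src)
      pvReach.init (by omega)
    exact pvReachFix_unique G comp n src hG hc1 hs hA.1 hB.1 hA.2 hB.2
  · intro w hw x hx
    by_cases hwsrc : w = src
    · exact Or.inr (by simp [hwsrc])
    · have hwb := hc1 w hw
      have hxb := hG w x hx hwb
      refine Or.inl ?_
      rw [pvInit_get n src hs w (by omega) (by omega),
        pvInit_get n src hs x (by omega) (by omega), if_neg hwsrc]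
      split_ifs <;> omega
  · simp only [List.length_singleton]
    omega

-- rows of A's matrix: pvBfsA touches only its own row, so after the fold over
-- all sources row u is exactly the single-source row pvRowB
lemma pvBfsA_len (G : PySem.Dict Int (PySem.Set Int)) (n : Int)
    (M : List (List Int)) (s : Int) : (pvBfsA G n M s).length = M.length := by
  simp [pvBfsA, PySem.List.length_pySetD]

lemma pvRowsPres (G : PySem.Dict Int (PySem.Set Int)) (n : Int) :
    ∀ (l : List Int) (M : List (List Int)) (u : Int), 0 ≤ u → u < (M.length : Int) →
      (∀ j ∈ l, 0 ≤ j) → u ∉ l →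
      PySem.List.pyGetD (l.foldl (pvBfsA G n) M) u [] = PySem.List.pyGetD M u [] := by
  intro l
  induction l with
  | nil => intro M u _ _ _ _; rfl
  | cons s rest ih =>
    intro M u hu hlen hb hnotin
    rw [List.foldl_cons]
    have hs : 0 ≤ s := hb s List.mem_cons_self
    have hne : s ≠ u := fun h => hnotin (h ▸ List.mem_cons_self)
    rw [ih _ _ hu (by rw [pvBfsA_len]; exact hlen)
        (fun j hj => hb j (List.mem_cons_of_mem _ hj))
        (fun h => hnotin (List.mem_cons_of_mem _ h))]
    exact pvGetSetNe M s u _ _ hs hu hne hlen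

lemma pvRows (G : PySem.Dict Int (PySem.Set Int)) (n : Int) :
    ∀ (l : List Int) (M : List (List Int)) (u : Int),
      M.length = (n+1).toNat → l.Nodup → (∀ j ∈ l, 1 ≤ j ∧ j ≤ n) → u ∈ l →
      PySem.List.pyGetD M u [] = List.replicate (n+1).toNat (10^4+1) →
      PySem.List.pyGetD (l.foldl (pvBfsA G n) M) u [] = pvRowB G n u := by
  intro l
  induction l with
  | nil => intro M u _ _ _ hu; cases hu
  | cons s rest ih =>
    intro M u hlen hnd hb hu h0
    have hsb := hb s List.mem_cons_self
    have hub := hb u hu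
    have hulen : u < (M.length : Int) := by
      rw [hlen]; omega
    rw [List.foldl_cons]
    rcases List.mem_cons.mp hu with rfl | hur
    · have hrow : PySem.List.pyGetD (pvBfsA G n M u) u [] = pvRowB G n u := by
        unfold pvBfsA pvRowB pvInit
        rw [pvGetSetSelf _ _ _ _ (by omega) hulen, h0]
      have hpres := pvRowsPres G n rest (pvBfsA G n M u) u (by omega)
        (by rw [pvBfsA_len]; exact hulen)
        (fun j hj => by have := hb j (List.mem_cons_of_mem _ hj); omega)
        ((List.nodup_cons.mp hnd).1)
      rw [hpres]
      exact hrow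
    · have hne : s ≠ u := by
        rintro rfl
        exact (List.nodup_cons.mp hnd).1 hur
      refine ih _ _ (by rw [pvBfsA_len]; exact hlen) ((List.nodup_cons.mp hnd).2)
        (fun j hj => hb j (List.mem_cons_of_mem _ hj)) hur ?_
      unfold pvBfsA
      rw [pvGetSetNe M s u _ _ (by omega) (by omega) hne hulen]
      exact h0

-- what one (partial) run of the coloring DFS guarantees about its state triple
def pvDP (G : PySem.Dict Int (PySem.Set Int)) (n : Int) (color nodes : List Int)
    (r : Bool × List Int × List Int) : Prop :=
  r.2.1.length = (n+1).toNat ∧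
  (∀ x : Int, 0 ≤ x → x ≤ n → PySem.List.pyGetD color x 0 ≠ 0 →
    PySem.List.pyGetD r.2.1 x 0 = PySem.List.pyGetD color x 0) ∧
  (∀ x ∈ nodes, x ∈ r.2.2) ∧
  (∀ x ∈ r.2.2, x ∈ nodes ∨ (1 ≤ x ∧ x ≤ n ∧ PySem.List.pyGetD color x 0 = 0 ∧
    PySem.List.pyGetD r.2.1 x 0 ≠ 0)) ∧
  (∀ x : Int, 1 ≤ x → x ≤ n → PySem.List.pyGetD r.2.1 x 0 ≠ 0 →
    PySem.List.pyGetD color x 0 ≠ 0 ∨ x ∈ r.2.2) ∧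
  (r.1 = true → ∀ x ∈ r.2.2, x ∉ nodes → ∀ v ∈ G.getD x PySem.Set.empty,
    PySem.List.pyGetD r.2.1 v 0 ≠ 0)

lemma pvDP_refl (G : PySem.Dict Int (PySem.Set Int)) (n : Int)
    (color nodes : List Int) (ok : Bool) (hlen : color.length = (n+1).toNat) :
    pvDP G n color nodes (ok, color, nodes) := by
  refine ⟨hlen, fun x _ _ _ => rfl, fun x hx => hx, fun x hx => Or.inl hx,
    fun x _ _ h => Or.inl h, ?_⟩
  intro _ x hx hnx
  exact absurd hx hnx

lemma pvDP_trans (G : PySem.Dict Int (PySem.Set Int)) (n : Int)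
    {color nodes c1 n1 : List Int} {ok1 : Bool}
    {r : Bool × List Int × List Int}
    (hd : pvDP G n color nodes (ok1, c1, n1))
    (hr : pvDP G n c1 n1 r)
    (h6 : r.1 = true → ∀ x ∈ n1, x ∉ nodes → ∀ v ∈ G.getD x PySem.Set.empty,
      PySem.List.pyGetD r.2.1 v 0 ≠ 0) :
    pvDP G n color nodes r := by
  obtain ⟨hd1, hd2, hd3, hd4, hd5, _⟩ := hd
  obtain ⟨hr1, hr2, hr3, hr4, hr5, hr6⟩ := hr
  refine ⟨hr1, ?_, ?_, ?_, ?_, ?_⟩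
  · intro x h0 h1 hc
    rw [hr2 x h0 h1 (by rw [hd2 x h0 h1 hc]; exact hc)]
    exact hd2 x h0 h1 hc
  · intro x hx
    exact hr3 x (hd3 x hx)
  · intro x hx
    rcases hr4 x hx with hx1 | ⟨hb1, hb2, hc0, hcn⟩
    · rcases hd4 x hx1 with hxn | ⟨hb1, hb2, hc0, hcn⟩
      · exact Or.inl hxn
      · refine Or.inr ⟨hb1, hb2, hc0, ?_⟩
        rw [hr2 x (by omega) hb2 hcn]
        exact hcn
    · refine Or.inr ⟨hb1, hb2, ?_, hcn⟩
      by_contra hne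
      have heq := hd2 x (by omega) hb2 hne
      rw [heq] at hc0
      exact hne hc0
  · intro x h0 h1 hc
    rcases hr5 x h0 h1 hc with hc1 | hx
    · rcases hd5 x h0 h1 hc1 with h | h
      · exact Or.inl h
      · exact Or.inr (hr3 x h)
    · exact Or.inr hx
  · intro hok x hx hnx
    rcases hr4 x hx with hx1 | ⟨hb1, hb2, hc0, _⟩
    · exact h6 hok x hx1 hnx
    · have hxn1 : x ∉ n1 := by
        intro hxn1
        rcases hd4 x hxn1 with h | h
        · exact hnx h
        · exact h.2.2.2 hc0
      exact hr6 hok x hx hxn1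

-- the coloring DFS: every run satisfies pvDP, successful runs color cur and all
-- of the listed children
lemma pvDfsFacts (G : PySem.Dict Int (PySem.Set Int)) (n : Int) (hG : pvAdjBnd n G) :
    ∀ fuel : Nat,
    (∀ (cur col : Int) (color nodes : List Int), 1 ≤ cur → cur ≤ n →
      (col = 1 ∨ col = -1) → color.length = (n+1).toNat →
      pvDP G n color nodes (pvDfs G fuel cur col color nodes) ∧
      ((pvDfs G fuel cur col color nodes).1 = true →
        PySem.List.pyGetD (pvDfs G fuel cur col color nodes).2.1 cur 0 ≠ 0)) ∧
    (∀ (l : List Int) (col : Int) (color nodes : List Int),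
      (∀ i ∈ l, 1 ≤ i ∧ i ≤ n) → (col = 1 ∨ col = -1) → color.length = (n+1).toNat →
      pvDP G n color nodes (pvDfsKids G fuel l col color nodes) ∧
      ((pvDfsKids G fuel l col color nodes).1 = true →
        ∀ i ∈ l, PySem.List.pyGetD (pvDfsKids G fuel l col color nodes).2.1 i 0 ≠ 0)) := by
  intro fuel
  induction fuel with
  | zero =>
    constructor
    · intro cur col color nodes _ _ _ hlen
      have e0 : pvDfs G 0 cur col color nodes = (false, color, nodes) := by rw [pvDfs]
      rw [e0]
      exact ⟨pvDP_refl G n color nodes false hlen, by intro h; cases h⟩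
    · intro l col color nodes _ _ hlen
      cases l with
      | nil =>
        have e0 : pvDfsKids G 0 [] col color nodes = (true, color, nodes) := by rw [pvDfsKids]
        rw [e0]
        exact ⟨pvDP_refl G n color nodes true hlen, by intro _ i hi; cases hi⟩
      | cons i rest =>
        have e0 : pvDfsKids G 0 (i :: rest) col color nodes = (false, color, nodes) := by
          rw [pvDfsKids, pvDfs]
          rfl
        rw [e0]
        exact ⟨pvDP_refl G n color nodes false hlen, by intro h; cases h⟩
  | succ fuel ih =>
    have hkfuel := ih.2
    have hdfs : ∀ (cur col : Int) (color nodes : List Int), 1 ≤ cur → cur ≤ n →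
        (col = 1 ∨ col = -1) → color.length = (n+1).toNat →
        pvDP G n color nodes (pvDfs G (fuel+1) cur col color nodes) ∧
        ((pvDfs G (fuel+1) cur col color nodes).1 = true →
          PySem.List.pyGetD (pvDfs G (fuel+1) cur col color nodes).2.1 cur 0 ≠ 0) := by
      intro cur col color nodes h1 h2 hcol hlen
      have e : pvDfs G (fuel+1) cur col color nodes =
          if PySem.List.pyGetD color cur 0 ≠ 0 then
            (PySem.List.pyGetD color cur 0 == col, color, nodes)
          else pvDfsKids G fuel (G.getD cur PySem.Set.empty) (-1*col)
            (PySem.List.pySetD color cur col) (nodes ++ [cur]) := by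
        rw [pvDfs]
      rw [e]
      by_cases hcc : PySem.List.pyGetD color cur 0 ≠ 0
      · rw [if_pos hcc]
        exact ⟨pvDP_refl G n color nodes _ hlen, fun _ => hcc⟩
      · rw [if_neg hcc]
        rw [not_not] at hcc
        have hcollen : (color.length : Int) = n + 1 := by rw [hlen]; simp; omega
        have hlen1 : (PySem.List.pySetD color cur col).length = (n+1).toNat := by
          rw [PySem.List.length_pySetD]; exact hlen
        have hset_self : PySem.List.pyGetD (PySem.List.pySetD color cur col) cur 0 = col :=
          pvGetSetSelf _ _ _ _ (by omega) (by omega)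
        have hset_ne : ∀ x : Int, 0 ≤ x → x ≤ n → x ≠ cur →
            PySem.List.pyGetD (PySem.List.pySetD color cur col) x 0 =
            PySem.List.pyGetD color x 0 := by
          intro x h0 h1' hne
          exact pvGetSetNe _ _ _ _ _ (by omega) h0 (fun he => hne he.symm) (by omega)
        have hcolne : col ≠ 0 := by rcases hcol with rfl | rfl <;> decide
        have hstep : pvDP G n color nodes
            (false, PySem.List.pySetD color cur col, nodes ++ [cur]) := by
          refine ⟨hlen1, ?_, ?_, ?_, ?_, ?_⟩
          · intro x h0 h1' hcx
            have hne : x ≠ cur := fun he => hcx (he ▸ hcc)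
            exact hset_ne x h0 h1' hne
          · intro x hx; exact List.mem_append_left _ hx
          · intro x hx
            rcases List.mem_append.mp hx with hx | hx
            · exact Or.inl hx
            · have hxc := List.mem_singleton.mp hx
              subst hxc
              exact Or.inr ⟨h1, h2, hcc, by rw [hset_self]; exact hcolne⟩
          · intro x h0 h1' hcx
            by_cases hne : x = cur
            · subst hne
              exact Or.inr (List.mem_append_right _ List.mem_cons_self)
            · rw [hset_ne x (by omega) h1' hne] at hcx
              exact Or.inl hcx
          · intro h; cases h
        have hlb : ∀ i ∈ G.getD cur PySem.Set.empty, 1 ≤ i ∧ i ≤ n :=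
          fun i hi => hG cur i hi ⟨h1, h2⟩
        have hcol' : (-1*col = 1 ∨ -1*col = -1) := by
          rcases hcol with rfl | rfl
          · right; norm_num
          · left; norm_num
        have hk := hkfuel (G.getD cur PySem.Set.empty) (-1*col)
          (PySem.List.pySetD color cur col) (nodes ++ [cur]) hlb hcol' hlen1
        refine ⟨pvDP_trans G n hstep hk.1 ?_, ?_⟩
        · intro hok x hx hnx v hv
          have hxc : x = cur := by
            rcases List.mem_append.mp hx with h | h
            · exact absurd h hnx
            · exact List.mem_singleton.mp h
          subst hxc
          exact hk.2 hok v hv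
        · intro _
          have hCcur : PySem.List.pyGetD (PySem.List.pySetD color cur col) cur 0 ≠ 0 := by
            rw [hset_self]; exact hcolne
          have := hk.1.2.1 cur (by omega) h2 hCcur
          rw [this]
          exact hCcur
    refine ⟨hdfs, ?_⟩
    intro l
    induction l with
    | nil =>
      intro col color nodes _ _ hlen
      have e0 : pvDfsKids G (fuel+1) [] col color nodes = (true, color, nodes) := by
        rw [pvDfsKids]
      rw [e0]
      exact ⟨pvDP_refl G n color nodes true hlen, by intro _ i hi; cases hi⟩
    | cons i rest ihl =>
      intro col color nodes hl hcol hlen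
      have hib := hl i List.mem_cons_self
      have e : pvDfsKids G (fuel+1) (i :: rest) col color nodes =
          (match pvDfs G (fuel+1) i col color nodes with
           | (ok, color, nodes) =>
             if ok then pvDfsKids G (fuel+1) rest col color nodes
             else (false, color, nodes)) := by
        rw [pvDfsKids]
      rw [e]
      have hd := hdfs i col color nodes hib.1 hib.2 hcol hlen
      rcases hres : pvDfs G (fuel+1) i col color nodes with ⟨ok1, c1, n1⟩
      rw [hres] at hd
      cases ok1 with
      | false =>
        simp only [Bool.false_eq_true, if_false]
        exact ⟨hd.1, by intro h; cases h⟩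
      | true =>
        simp only [if_true]
        have hlen1 : c1.length = (n+1).toNat := hd.1.1
        have hr := ihl col c1 n1 (fun j hj => hl j (List.mem_cons_of_mem _ hj)) hcol hlen1
        refine ⟨pvDP_trans G n hd.1 hr.1 ?_, ?_⟩
        · intro hok x hx hnx v hv
          have hxb : 1 ≤ x ∧ x ≤ n := by
            rcases hd.1.2.2.2.1 x hx with h | h
            · exact absurd h hnx
            · exact ⟨h.1, h.2.1⟩
          have hvb := hG x v hv hxb
          have hCv := hd.1.2.2.2.2.2 rfl x hx hnx v hv
          have := hr.1.2.1 v (by omega) (by omega) hCv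
          rw [this]
          exact hCv
        · intro hok j hj
          rcases List.mem_cons.mp hj with hje | hj'
          · subst hje
            have hCi := hd.2 rfl
            have := hr.1.2.1 j (by omega) hib.2 hCi
            rw [this]
            exact hCi
          · exact hr.2 hok j hj'

-- any index of an all-zero color row reads 0 (also for negative indices)
lemma pvRepl0 (m : Nat) (x : Int) :
    PySem.List.pyGetD (List.replicate m (0:Int)) x 0 = 0 := by
  cases h : PySem.List.pyGet? (List.replicate m (0:Int)) x with
  | none => simp [PySem.List.pyGetD, h]
  | some v =>
    have hv := PySem.List.mem_of_pyGet?_eq_some (h := h)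
    have hv0 : v = 0 := List.eq_of_mem_replicate hv
    simp [PySem.List.pyGetD, h, hv0]

-- the two main loops agree step by step
lemma pvMain_eq (G : PySem.Dict Int (PySem.Set Int)) (n : Int) (fuelD : Nat)
    (dist : List (List Int)) (hG : pvAdjBnd n G)
    (hSym : ∀ a b, b ∈ G.getD a PySem.Set.empty → a ∈ G.getD b PySem.Set.empty)
    (hrow : ∀ u : Int, 1 ≤ u → u ≤ n →
      PySem.List.pyGetD dist u [] = pvRowB G n u) :
    ∀ (l color : List Int) (ans : Int), (∀ i ∈ l, 1 ≤ i ∧ i ≤ n) →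
    color.length = (n+1).toNat →
    (∀ x : Int, 1 ≤ x → x ≤ n → PySem.List.pyGetD color x 0 ≠ 0 →
      ∀ v ∈ G.getD x PySem.Set.empty, PySem.List.pyGetD color v 0 ≠ 0) →
    pvMainA G dist fuelD l color ans = pvMainB G n fuelD l color ans := by
  intro l
  induction l with
  | nil => intro color ans _ _ _; rfl
  | cons i rest ih =>
    intro color ans hb hlen hminv
    have hib := hb i List.mem_cons_self
    rw [pvMainA, pvMainB]
    by_cases hcond : (PySem.List.pyGetD color i 0 == 0) = true
    · simp only [if_pos hcond]
      have hceq : PySem.List.pyGetD color i 0 = 0 := by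
        exact beq_iff_eq.mp hcond
      have hdp := (pvDfsFacts G n hG fuelD).1 i 1 color [] hib.1 hib.2 (Or.inl rfl) hlen
      rcases hres : pvDfs G fuelD i 1 color [] with ⟨ok, c1, kara⟩
      rw [hres] at hdp
      cases ok with
      | false => rfl
      | true =>
        simp only [Bool.not_true, Bool.false_eq_true, if_false]
        have hkb : ∀ x ∈ kara, 1 ≤ x ∧ x ≤ n := by
          intro x hx
          rcases hdp.1.2.2.2.1 x hx with h | h
          · cases h
          · exact ⟨h.1, h.2.1⟩
        have hk0 : ∀ x ∈ kara, PySem.List.pyGetD color x 0 = 0 := by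
          intro x hx
          rcases hdp.1.2.2.2.1 x hx with h | h
          · cases h
          · exact h.2.2.1
        have hclosure : ∀ u ∈ kara, ∀ v ∈ G.getD u PySem.Set.empty, v ∈ kara := by
          intro u hu v hv
          have hub := hkb u hu
          have hvb := hG u v hv hub
          have hCv := hdp.1.2.2.2.2.2 rfl u hu (by intro h; cases h) v hv
          rcases hdp.1.2.2.2.2.1 v (by omega) (by omega) hCv with hCcol | hvk
          · exfalso
            have hu' : u ∈ G.getD v PySem.Set.empty := hSym u v hv
            have := hminv v (by omega) (by omega) hCcol u hu'
            exact this (hk0 u hu)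
          · exact hvk
        have hbest : kara.foldl (fun m u => kara.foldl
              (fun m v => max m (PySem.List.pyGetD (PySem.List.pyGetD dist u []) v 0)) m) 0
            = kara.foldl (fun b u =>
              let d := pvDepths G n u kara
              kara.foldl (fun b v => max b (PySem.List.pyGetD d v 0)) b) 0 := by
          refine PySem.List.foldl_congr_mem kara _ _ 0 ?_
          intro acc u hu
          show kara.foldl
              (fun m v => max m (PySem.List.pyGetD (PySem.List.pyGetD dist u []) v 0)) acc
            = kara.foldl (fun b v => max b (PySem.List.pyGetD (pvDepths G n u kara) v 0)) acc
          refine PySem.List.foldl_congr_mem kara _ _ acc ?_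
          intro acc' v hv
          have hub := hkb u hu
          have hvb := hkb v hv
          rw [hrow u hub.1 hub.2,
            pvRow_eq G kara n u hG hkb hclosure hu v (by omega) (by omega)]
        rw [hbest]
        refine ih c1 _ (fun j hj => hb j (List.mem_cons_of_mem _ hj)) hdp.1.1 ?_
        intro x h1 h2 hCx v hv
        have hvb := hG x v hv ⟨h1, h2⟩
        rcases hdp.1.2.2.2.2.1 x h1 h2 hCx with hCcol | hxk
        · have hCvcol := hminv x h1 h2 hCcol v hv
          rw [hdp.1.2.1 v (by omega) (by omega) hCvcol]
          exact hCvcol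
        · exact hdp.1.2.2.2.2.2 rfl x hxk (by intro h; cases h) v hv
    · simp only [if_neg hcond]
      exact ih color ans (fun j hj => hb j (List.mem_cons_of_mem _ hj)) hlen hminv

-- ===== VERDICT (by name: the statement is the Claim_ definition above) =====
theorem magnificentSets2_spec : Claim_equal_magnificentSets2 := by
  unfold Claim_equal_magnificentSets2
  intro n edges _ hpre
  unfold Spec_magnificentSets2
  have hp : ∀ e ∈ edges, ∀ u ∈ e, ∀ v ∈ e, 1 ≤ u ∧ u ≤ n → 1 ≤ v ∧ v ≤ n := by
    unfold Pre_magnificentSets2 at hpre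
    simp only [List.all_eq_true, Bool.and_eq_true, Bool.or_eq_true, beq_iff_eq,
      decide_eq_true_eq] at hpre
    intro e he u hu v hv hub
    rcases (hpre e he).2 with (hn0 | hin) | hout
    · omega
    · exact hin v hv
    · have := hout u hu; omega
  have hG := pvAdjBnd_of_bounds n edges hp
  have hSym := pvAdjSym edges
  unfold magnificentSets2 magnificentSets2_alt
  dsimp only
  refine pvMain_eq (pvAdj edges) n (pvFuelDfs n) _ hG hSym ?_
    (PySem.List.pyRange 1 (n+1) 1) _ 0 ?_ (by simp) ?_
  · intro u h1 h2
    refine pvRows (pvAdj edges) n (PySem.List.pyRange 1 (n+1) 1) _ u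
      (by simp) (PySem.List.nodup_pyRange_one 1 (n+1))
      (fun j hj => by
        have := PySem.List.mem_pyRange_one.mp hj; omega)
      (PySem.List.mem_pyRange_one.mpr ⟨h1, by omega⟩) ?_
    rw [show (u : Int) = ((u.toNat : Nat) : Int) by omega,
      PySem.List.pyGetD_natCast]
    rw [List.getD_eq_getElem?_getD]
    simp [show u.toNat < (n + 1).toNat by omega]
  · intro i hi
    have := PySem.List.mem_pyRange_one.mp hi; omega
  · intro x _ _ hCx
    exact absurd (pvRepl0 (n+1).toNat x) hCx
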